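-- pv_equiv track=rewrite | github.com/ivan-danilenko/klrw_project | klrw/stable_envelopes.py | maps_to
-- ===== SOURCE A (Python) =====
-- def maps_to(index):
--     """
--     Generator returning (sign,next_index)
--     Sign is the Koszul sign,
--     next_index is the index where one of the zeroes is replaced by a one
--     """
--     iter = (x for x in range(len(index)) if index[x] == 1)
--     for i in iter:
--         left_part = index[:i]
--         right_part = index[i + 1 :]
--         degree = sum(right_part)
--         sign = 1 if degree % 2 == 0 else -1
--         yield sign, left_part + (0,) + right_part
-- ===== SOURCE B (Python) =====
-- def maps_to(index):
--     """
--     Generator returning (sign,next_index)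
--
--     Re-implementation: a suffix-sum table is built in one reverse pass
--     (suffix[j] == sum(index[j:])), then a single forward pass over the
--     positions of ones reads the Koszul sign from the table instead of
--     re-summing the right part at every position.
--     """
--     suffix = [0]
--     for x in reversed(index):
--         suffix.append(x + suffix[-1])
--     suffix.reverse()
--     for i, x in enumerate(index):
--         if x == 1:
--             sign = 1 if suffix[i + 1] % 2 == 0 else -1
--             yield sign, index[:i] + (0,) + index[i + 1:]
-- ===== Notes on version B (the rewrite author's own statement) =====
-- stated objective: alternative
-- what changed: B precomputes a suffix-sum table in one reverse pass and the forward pass over the ones reads the Koszul sign from the table, instead of A re-summing the right slice at each one.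
import Mathlib
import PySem

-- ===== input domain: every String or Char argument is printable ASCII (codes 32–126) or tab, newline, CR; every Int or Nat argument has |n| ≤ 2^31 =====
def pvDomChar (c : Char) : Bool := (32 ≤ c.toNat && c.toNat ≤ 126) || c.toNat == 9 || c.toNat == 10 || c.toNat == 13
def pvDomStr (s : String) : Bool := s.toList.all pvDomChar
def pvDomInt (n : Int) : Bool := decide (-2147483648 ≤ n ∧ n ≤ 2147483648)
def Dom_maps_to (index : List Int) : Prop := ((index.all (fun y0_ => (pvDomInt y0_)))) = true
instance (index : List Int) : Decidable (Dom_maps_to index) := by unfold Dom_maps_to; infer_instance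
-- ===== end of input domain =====

-- B replaces A's per-position re-summation of the right slice by a suffix-sum table built in one reverse pass (objective: alternative data structure, same output order).

-- ===== PORT A =====
def maps_to (index : List Int) : List (Int × List Int) :=
  let iter := (PySem.List.pyRange 0 (index.length : Int)).filter
    (fun x => PySem.List.pyGet? index x == some 1)
  iter.foldl (fun acc i =>
    let left_part := PySem.List.slice index none (some i)
    let right_part := PySem.List.slice index (some (i + 1)) none
    let degree := right_part.sum
    let sign : Int := if PySem.Int.mod degree 2 == 0 then 1 else -1
    acc ++ [(sign, left_part ++ [0] ++ right_part)]) []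

-- ===== PORT B =====
def maps_to_alt (index : List Int) : List (Int × List Int) :=
  let suffix := (index.reverse.foldl
    (fun s x => s ++ [x + PySem.List.pyGetD s (-1) 0]) [0]).reverse
  (PySem.List.enumerate index).foldl (fun acc p =>
    if p.2 == 1 then
      let sign : Int := if PySem.Int.mod (PySem.List.pyGetD suffix (p.1 + 1) 0) 2 == 0 then 1 else -1
      acc ++ [(sign, PySem.List.slice index none (some p.1) ++ [0]
                       ++ PySem.List.slice index (some (p.1 + 1)) none)]
    else acc) []

-- ===== PRECONDITION & SPEC =====
def Spec_maps_to (index : List Int) (out : List (Int × List Int)) : Prop := out = maps_to_alt index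
instance (index : List Int) (out : List (Int × List Int)) : Decidable (Spec_maps_to index out) := by unfold Spec_maps_to; infer_instance

-- ===== CLAIM (what is proved, stated in full; the proofs are below) =====
def Claim_equal_maps_to : Prop := ∀ (index : List Int), Dom_maps_to index → Spec_maps_to index (maps_to index)

-- ===== LEMMAS AND PROOFS =====

-- enumerate over Ints, characterised via List.range
lemma enum_eq (l : List Int) (k : Int) :
    PySem.List.enumerate l k =
      (List.range l.length).map (fun (j : Nat) => ((k + j : Int), l.getD j 0)) := by
  induction l generalizing k with
  | nil => simp [PySem.List.enumerate]
  | cons x t ih =>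
      simp only [PySem.List.enumerate, List.length_cons, List.range_succ_eq_map,
        List.map_cons, List.map_map, ih]
      congr 1
      · simp
      · apply List.map_congr_left
        intro j _
        simp only [Function.comp_apply, List.getD_cons_succ, Prod.mk.injEq]
        refine ⟨by push_cast; ring, trivial⟩

-- s[-1] of a reversed nonempty list is its head  (pyGetD unfolded by simp; exact on nonempty lists)
lemma pyGetD_reverse_neg_one (u : List Int) (hu : u ≠ []) :
    PySem.List.pyGetD u.reverse (-1) 0 = PySem.List.pyGetD u 0 0 := by
  cases u with
  | nil => exact absurd rfl hu
  | cons b v =>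
      rw [List.reverse_cons]
      simp [PySem.List.pyGetD, PySem.List.pyGet?, PySem.List.pyIdx?]

-- building the table by appending then reversing equals building it by prepending
lemma build_rev (l : List Int) : ∀ (u : List Int), u ≠ [] →
    l.foldl (fun s x => s ++ [x + PySem.List.pyGetD s (-1) 0]) u.reverse
      = (l.foldl (fun s x => (x + PySem.List.pyGetD s 0 0) :: s) u).reverse := by
  induction l with
  | nil => intro u _; rfl
  | cons x t ih =>
      intro u hu
      simp only [List.foldl_cons, pyGetD_reverse_neg_one u hu, ← List.reverse_cons]
      exact ih _ (by simp)

-- prepend-built table equals the sums of all tails of index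
lemma cons_build_eq (index : List Int) :
    index.reverse.foldl (fun s x => (x + PySem.List.pyGetD s 0 0) :: s) [0]
      = index.tails.map List.sum := by
  rw [List.foldl_reverse]
  induction index with
  | nil => simp
  | cons x t ih =>
      have hhead : PySem.List.pyGetD (t.tails.map List.sum) 0 0 = t.sum := by
        cases t with
        | nil => rfl
        | cons a u =>
            rw [List.tails_cons, List.map_cons, PySem.List.pyGetD_ofNat']
            rfl
      simp [List.foldr_cons, ih, hhead]

-- the suffix table equals the sums of all tails of index
lemma suffix_eq (index : List Int) :
    (index.reverse.foldl (fun s x => s ++ [x + PySem.List.pyGetD s (-1) 0]) [0]).reverse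
      = index.tails.map List.sum := by
  have h0 : ([0] : List Int) = ([0] : List Int).reverse := rfl
  rw [h0, build_rev index.reverse [0] (by simp), List.reverse_reverse, cons_build_eq]

lemma suffix_getD (index : List Int) (k : Nat) (hk : k < index.length) :
    PySem.List.pyGetD (index.tails.map List.sum) ((k : Int) + 1) 0
      = (index.drop (k + 1)).sum := by
  have h1 : ((k : Int) + 1) = ((k + 1 : Nat) : Int) := by push_cast; ring
  rw [h1, PySem.List.pyGetD_natCast]
  have hlen : k + 1 < (index.tails.map List.sum).length := by
    simp [List.length_tails]; omega
  rw [List.getD_eq_getElem _ _ hlen]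
  simp [List.getElem_tails]

-- one congruence step for map-over-filter with pointwise-equal predicates and functions
lemma map_filter_congr {β : Type} {f1 f2 : Nat → β} {p1 p2 : Nat → Bool} (l : List Nat)
    (hp : ∀ x ∈ l, p1 x = p2 x) (hf : ∀ x ∈ l, f1 x = f2 x) :
    (l.filter p1).map f1 = (l.filter p2).map f2 := by
  rw [List.filter_congr hp]
  exact List.map_congr_left fun x hx => hf x (List.mem_of_mem_filter hx)

-- ===== VERDICT (by name: the statement is the Claim_ definition above) =====
theorem maps_to_spec : Claim_equal_maps_to := by
  intro index _
  unfold Spec_maps_to maps_to maps_to_alt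
  rw [suffix_eq]
  rw [PySem.List.foldl_append_singleton_eq_map, enum_eq, PySem.List.foldl_append_if,
    PySem.List.pyRange_zero_natCast, List.filter_map, List.filter_map, List.map_map,
    List.map_map, List.nil_append, List.nil_append]
  apply map_filter_congr
  · intro j hj
    rw [List.mem_range] at hj
    simp [Function.comp, PySem.List.pyGet?_natCast, List.getElem?_eq_getElem hj]
  · intro j hj
    rw [List.mem_range] at hj
    have h0 : ((0 + j : Int)) = ((j : Nat) : Int) := by ring
    simp only [Function.comp_apply, h0]
    have hslice1 : PySem.List.slice index none (some ((j : Nat) : Int)) = index.take j := by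
      rw [PySem.List.slice_to index (by positivity)]; simp
    have hslice2 : PySem.List.slice index (some (((j : Nat) : Int) + 1)) none
        = index.drop (j + 1) := by
      have h2 : ((j : Nat) : Int) + 1 = ((j + 1 : Nat) : Int) := by omega
      rw [h2, PySem.List.slice_from index (by positivity)]
      simp
    rw [hslice1, hslice2, suffix_getD index j hj]
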